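-- pv_equiv track=rewrite | github.com/SoroushVahidi/Augmented-caching | scripts/analyze_pairwise_inversion_examples.py | apply_inversions
-- ===== SOURCE A (Python) =====
-- from typing import Dict, List, Sequence, Tuple
--
-- def apply_inversions(order: List[str], n_inversions: int) -> List[str]:
--     out = list(order)
--     i = 0
--     applied = 0
--     while applied < n_inversions and len(out) >= 2:
--         a = i % (len(out) - 1)
--         out[a], out[a + 1] = out[a + 1], out[a]
--         applied += 1
--         i += 1
--     return out
-- ===== SOURCE B (Python) =====
-- def apply_inversions(order, n_inversions):
--     out = list(order)
--     L = len(out)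
--     if L < 2 or n_inversions <= 0:
--         return out
--     q, r = divmod(n_inversions, L - 1)
--     k = q % L
--     rot = out[k:] + out[:k]
--     head, tail = rot[0], rot[1:]
--     return tail[:r] + [head] + tail[r:]
-- ===== Notes on version B (the rewrite author's own statement) =====
-- stated objective: faster
-- what changed: A performs n_inversions adjacent swaps one by one; B observes that each full cycle of len-1 swaps is a left rotation by one, so it builds the result with one slice-based rotation plus a single splice for the n_inversions % (len-1) remaining swaps.
import Mathlib
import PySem

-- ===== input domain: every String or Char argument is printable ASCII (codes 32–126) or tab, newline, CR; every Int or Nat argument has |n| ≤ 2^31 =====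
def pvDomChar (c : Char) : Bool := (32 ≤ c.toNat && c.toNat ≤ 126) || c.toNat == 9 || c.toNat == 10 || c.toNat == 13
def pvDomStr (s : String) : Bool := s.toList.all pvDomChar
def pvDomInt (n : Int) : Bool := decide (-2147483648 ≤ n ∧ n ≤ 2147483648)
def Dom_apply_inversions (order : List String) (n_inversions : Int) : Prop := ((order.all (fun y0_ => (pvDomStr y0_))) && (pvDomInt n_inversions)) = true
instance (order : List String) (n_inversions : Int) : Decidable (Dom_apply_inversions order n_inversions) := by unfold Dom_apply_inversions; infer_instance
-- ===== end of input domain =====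

-- B replaces A's one-swap-at-a-time loop (O(n_inversions)) by a closed form:
-- each full cycle of len-1 adjacent swaps is a left rotation by one, so B rotates
-- once and applies only the n % (len-1) remaining swaps as a single slice splice.

-- ===== PORT A =====
-- out[a], out[a+1] = out[a+1], out[a]  (a+1 is always in range where A performs it)
def pvSwapAdj : List String → Nat → List String
  | x :: y :: rest, 0 => y :: x :: rest
  | x :: rest, a+1 => x :: pvSwapAdj rest a
  | l, _ => l

-- the while loop; fuel = number of iterations still to perform (applied < n_inversions)
def pvLoopA : List String → Nat → Nat → List String
  | out, _, 0 => out
  | out, i, k+1 =>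
      if 2 ≤ out.length then
        pvLoopA (pvSwapAdj out (i % (out.length - 1))) (i+1) k
      else out

def apply_inversions (order : List String) (n_inversions : Int) : List String :=
  pvLoopA order 0 n_inversions.toNat

-- ===== PORT B =====
def apply_inversions_alt (order : List String) (n_inversions : Int) : List String :=
  let out := order
  let L : Int := out.length
  if L < 2 ∨ n_inversions ≤ 0 then out
  else
    let q := PySem.Int.floordiv n_inversions (L - 1)
    let r := PySem.Int.mod n_inversions (L - 1)
    let k := PySem.Int.mod q L
    let rot := PySem.List.slice out (some k) none ++ PySem.List.slice out none (some k)
    match rot with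
    | [] => []   -- unreachable: L ≥ 2 here, so rot is nonempty (Python's rot[0] never raises)
    | head :: tail =>
        PySem.List.slice tail none (some r) ++ [head] ++ PySem.List.slice tail (some r) none

-- ===== PRECONDITION & SPEC =====
def Spec_apply_inversions (order : List String) (n_inversions : Int) (out : List String) : Prop := out = apply_inversions_alt order n_inversions
instance (order : List String) (n_inversions : Int) (out : List String) : Decidable (Spec_apply_inversions order n_inversions out) := by unfold Spec_apply_inversions; infer_instance

-- ===== CLAIM (what is proved, stated in full; the proofs are below) =====
def Claim_equal_apply_inversions : Prop := ∀ (order : List String) (n_inversions : Int), Dom_apply_inversions order n_inversions → Spec_apply_inversions order n_inversions (apply_inversions order n_inversions)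

-- ===== LEMMAS AND PROOFS =====

-- bubble: r swaps at positions 0,1,…,r-1 move the head r places to the right
def pvBub : List String → Nat → List String
  | x :: y :: rest, r+1 => y :: pvBub (x :: rest) r
  | l, _ => l

theorem pvBub_zero (l : List String) : pvBub l 0 = l := by
  cases l with
  | nil => rfl
  | cons x t => cases t <;> rfl

theorem pvSwapAdj_length (l : List String) (a : Nat) : (pvSwapAdj l a).length = l.length := by
  induction l generalizing a with
  | nil => cases a <;> rfl
  | cons x t ih =>
      cases a with
      | zero => cases t <;> simp [pvSwapAdj]
      | succ a => cases t <;> simp [pvSwapAdj, ih]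

theorem pvSwapAdj_cons_succ (x : String) (l : List String) (a : Nat) :
    pvSwapAdj (x :: l) (a+1) = x :: pvSwapAdj l a := by
  cases l <;> rfl

theorem pvLoopA_short (l : List String) (i k : Nat) (h : l.length < 2) :
    pvLoopA l i k = l := by
  cases k with
  | zero => rfl
  | succ k => simp [pvLoopA, Nat.not_le_of_lt h]

theorem pvLoopA_split (a b : Nat) (l : List String) (i : Nat) :
    pvLoopA l i (a + b) = pvLoopA (pvLoopA l i a) (i + a) b := by
  induction a generalizing l i with
  | zero => simp [pvLoopA]
  | succ a ih =>
      have h1 : a + 1 + b = (a + b) + 1 := by omega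
      rw [h1]
      by_cases h : 2 ≤ l.length
      · simp only [pvLoopA, if_pos h]
        rw [ih]
        congr 1
        omega
      · rw [pvLoopA_short l i ((a+b)+1) (by omega),
            pvLoopA_short l i (a+1) (by omega),
            pvLoopA_short l (i + (a+1)) b (by omega)]

theorem pvLoopA_peel (k : Nat) (i : Nat) (x : String) (l : List String)
    (h : i + k ≤ l.length - 1) :
    pvLoopA (x :: l) (i+1) k = x :: pvLoopA l i k := by
  induction k generalizing i l with
  | zero => rfl
  | succ k ih =>
      have hL : 2 ≤ l.length := by omega
      have h2 : 2 ≤ (x :: l).length := by simp; omega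
      have hmod1 : (i+1) % ((x :: l).length - 1) = i + 1 := by
        have : (x :: l).length - 1 = l.length := by simp
        rw [this]; exact Nat.mod_eq_of_lt (by omega)
      have hmod2 : i % (l.length - 1) = i := Nat.mod_eq_of_lt (by omega)
      simp only [pvLoopA, if_pos h2, if_pos hL, hmod1, hmod2]
      rw [pvSwapAdj_cons_succ]
      rw [ih (i+1) (pvSwapAdj l i) (by rw [pvSwapAdj_length]; omega)]

theorem pvLoopA_bub (r : Nat) (l : List String) (h : r ≤ l.length - 1) :
    pvLoopA l 0 r = pvBub l r := by
  induction r generalizing l with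
  | zero => rw [pvBub_zero]; rfl
  | succ r ih =>
      match l, h with
      | x :: y :: rest, h =>
        have h2 : 2 ≤ (x :: y :: rest).length := by simp
        have hswap : pvSwapAdj (x :: y :: rest) (0 % ((x :: y :: rest).length - 1)) = y :: x :: rest := by
          simp [pvSwapAdj]
        simp only [pvLoopA, if_pos h2, hswap]
        rw [pvLoopA_peel r 0 y (x :: rest) (by simp at h ⊢; omega)]
        rw [ih (x :: rest) (by simp at h ⊢; omega)]
        rfl

theorem pvBub_full (x : String) (rest : List String) :
    pvBub (x :: rest) rest.length = rest ++ [x] := by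
  induction rest generalizing x with
  | nil => rfl
  | cons y rest ih => simp only [List.length_cons, pvBub, ih]; rfl

theorem pvLoopA_shift (k : Nat) (l : List String) (i : Nat) (h : 2 ≤ l.length) :
    pvLoopA l (i + (l.length - 1)) k = pvLoopA l i k := by
  induction k generalizing l i with
  | zero => rfl
  | succ k ih =>
      have hmod : (i + (l.length - 1)) % (l.length - 1) = i % (l.length - 1) :=
        Nat.add_mod_right i (l.length - 1)
      simp only [pvLoopA, if_pos h, hmod]
      have hlen : (pvSwapAdj l (i % (l.length - 1))).length = l.length := pvSwapAdj_length _ _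
      have h1 : i + (l.length - 1) + 1 = (i + 1) + ((pvSwapAdj l (i % (l.length - 1))).length - 1) := by
        rw [hlen]; omega
      rw [h1, ih _ _ (by rw [hlen]; exact h)]

theorem pvLoopA_main (q : Nat) (r : Nat) (l : List String)
    (hL : 2 ≤ l.length) (hr : r ≤ l.length - 1) :
    pvLoopA l 0 ((l.length - 1) * q + r) = pvBub (l.rotate q) r := by
  induction q generalizing l with
  | zero =>
      rw [List.rotate_zero]
      simpa using pvLoopA_bub r l hr
  | succ q ih =>
      have hsplit : (l.length - 1) * (q + 1) + r = (l.length - 1) + ((l.length - 1) * q + r) := by ring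
      rw [hsplit, pvLoopA_split]
      have hcycle : pvLoopA l 0 (l.length - 1) = l.rotate 1 := by
        rw [pvLoopA_bub (l.length - 1) l le_rfl]
        match l, hL with
        | x :: rest, _ =>
          have : (x :: rest).length - 1 = rest.length := by simp
          rw [this, pvBub_full]
          rw [List.rotate_eq_drop_append_take (by simp)]
          simp
      rw [hcycle]
      have hlen1 : (l.rotate 1).length = l.length := List.length_rotate l 1
      have hsh : (0 : Nat) + (l.length - 1) = 0 + ((l.rotate 1).length - 1) := by rw [hlen1]
      rw [hsh, pvLoopA_shift _ _ _ (by rw [hlen1]; exact hL)]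
      have hih := ih (l.rotate 1) (by rw [hlen1]; exact hL) (by rw [hlen1]; exact hr)
      rw [hlen1] at hih
      rw [hih]
      rw [List.rotate_rotate]
      congr 2
      omega

theorem pvBub_slice (r : Nat) (h : String) (t : List String) (hr : r ≤ t.length) :
    t.take r ++ [h] ++ t.drop r = pvBub (h :: t) r := by
  induction r generalizing h t with
  | zero => simp [pvBub_zero]
  | succ r ih =>
      match t, hr with
      | y :: rest, hr =>
        simp only [List.take_succ_cons, List.drop_succ_cons, pvBub]
        rw [← ih h rest (by simpa using hr)]
        simp

-- ===== VERDICT (by name: the statement is the Claim_ definition above) =====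
theorem apply_inversions_spec : Claim_equal_apply_inversions := by
  intro order n _dom
  unfold Spec_apply_inversions apply_inversions apply_inversions_alt
  by_cases hc : (order.length : Int) < 2 ∨ n ≤ 0
  · rw [if_pos hc]
    rcases hc with h | h
    · exact pvLoopA_short order 0 n.toNat (by exact_mod_cast h)
    · have : n.toNat = 0 := Int.toNat_of_nonpos h
      rw [this]; rfl
  · rw [if_neg hc]
    rw [not_or, not_lt, not_le] at hc
    obtain ⟨hL, hn⟩ := hc
    have hL2 : 2 ≤ order.length := by exact_mod_cast hL
    -- name the Nat quantities
    set N : Nat := n.toNat with hN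
    have hnN : n = (N : Int) := by omega
    set Lm : Nat := order.length - 1 with hLm
    have hLmpos : 0 < Lm := by omega
    have hcastL : ((order.length : Int) : Int) - 1 = ((Lm : Nat) : Int) := by
      omega
    -- B's integer arithmetic in Nat form
    have hq : PySem.Int.floordiv n ((order.length : Int) - 1) = ((N / Lm : Nat) : Int) := by
      rw [hnN, hcastL]; exact PySem.Int.floordiv_natCast N Lm
    have hrm : PySem.Int.mod n ((order.length : Int) - 1) = ((N % Lm : Nat) : Int) := by
      rw [hnN, hcastL]; exact PySem.Int.mod_natCast N Lm
    simp only [hq, hrm]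
    have hk : PySem.Int.mod ((N / Lm : Nat) : Int) ((order.length : Nat) : Int)
        = (((N / Lm) % order.length : Nat) : Int) := PySem.Int.mod_natCast _ _
    simp only [hk]
    -- the rotation slices
    rw [PySem.List.slice_from_natCast, PySem.List.slice_to_natCast]
    set k' : Nat := (N / Lm) % order.length with hk'
    have hrot : order.drop k' ++ order.take k' = order.rotate (N / Lm) := by
      rw [← List.rotate_mod order (N / Lm)]
      rw [List.rotate_eq_drop_append_take (le_of_lt (Nat.mod_lt _ (by omega)))]
    -- A's side via the main lemma
    have hdecomp : N = Lm * (N / Lm) + N % Lm := (Nat.div_add_mod N Lm).symm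
    have hA : pvLoopA order 0 N = pvBub (order.rotate (N / Lm)) (N % Lm) := by
      conv_lhs => rw [hdecomp]
      have hm := pvLoopA_main (N / Lm) (N % Lm) order hL2
        (by have := Nat.mod_lt N hLmpos; omega)
      rw [← hLm] at hm
      exact hm
    -- B's side: match on rot
    have hrotlen : (order.drop k' ++ order.take k').length = order.length := by simp; omega
    match hrotE : order.drop k' ++ order.take k' with
    | [] => exfalso; rw [hrotE] at hrotlen; simp at hrotlen; omega
    | h :: t =>
        show pvLoopA order 0 N =
          PySem.List.slice t none (some ((N % Lm : Nat) : Int)) ++ [h] ++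
            PySem.List.slice t (some ((N % Lm : Nat) : Int)) none
        rw [PySem.List.slice_to_natCast, PySem.List.slice_from_natCast]
        have htlen : t.length = Lm := by
          rw [hrotE] at hrotlen; simp at hrotlen; omega
        rw [pvBub_slice (N % Lm) h t (by rw [htlen]; exact le_of_lt (Nat.mod_lt _ hLmpos))]
        rw [← hrotE, hrot]
        exact hA
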